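-- pv_equiv track=rewrite | github.com/DEBorodina/SP800-90B_EntropyAssessment | LRS_Estimate.py | find_u
-- ===== SOURCE A (Python) =====
-- from collections import Counter
--
-- def find_tuples(s, t):
--     return zip(*[s[i:] for i in range(t)])
--
-- def find_u(s, threshold):
--     count = threshold + 1
--     u = 0
--     while count >= threshold:
--         u += 1
--         c = Counter(find_tuples(s, u))
--         count = c.most_common(1)[0][1]
--     return u
-- ===== SOURCE B (Python) =====
-- def find_u(s, threshold):
--     n = len(s)
--
--     def max_count(u):
--         counts = {}
--         for i in range(n - u + 1):
--             t = tuple(s[i:i+u])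
--             counts[t] = counts.get(t, 0) + 1
--         return max(counts.values(), default=0)
--
--     # max_count is non-increasing in u, so the answer is the least u >= 1
--     # with max_count(u) < threshold: exponential growth, then binary search.
--     lo = 1
--     hi = 1
--     while max_count(hi) >= threshold:
--         lo = hi + 1
--         hi *= 2
--     while lo < hi:
--         mid = (lo + hi) // 2
--         if max_count(mid) >= threshold:
--             lo = mid + 1
--         else:
--             hi = mid
--     return lo
-- ===== Notes on version B (the rewrite author's own statement) =====
-- stated objective: faster
-- what changed: A scans u = 1, 2, 3, ... recounting all u-tuples with a Counter at every step; B exploits that the maximal tuple multiplicity is non-increasing in u and finds the least u with max_count(u) < threshold by exponential growth followed by binary search, with each probe a single dict-counting pass.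
import Mathlib
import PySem

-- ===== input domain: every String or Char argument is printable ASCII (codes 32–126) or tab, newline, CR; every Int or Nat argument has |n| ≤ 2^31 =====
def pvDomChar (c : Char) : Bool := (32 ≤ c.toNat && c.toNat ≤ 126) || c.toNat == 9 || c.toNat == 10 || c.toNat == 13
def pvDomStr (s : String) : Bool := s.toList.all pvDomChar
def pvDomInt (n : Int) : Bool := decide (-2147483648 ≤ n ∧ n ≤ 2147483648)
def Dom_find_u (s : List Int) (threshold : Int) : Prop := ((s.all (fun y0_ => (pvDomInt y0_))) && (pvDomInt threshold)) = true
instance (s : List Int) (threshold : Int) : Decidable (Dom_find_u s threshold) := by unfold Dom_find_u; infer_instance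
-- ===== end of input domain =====

-- B replaces A's linear scan over u (recounting all u-tuples at every step) by an
-- exponential-growth + binary search over u, exploiting that the maximal tuple
-- multiplicity is non-increasing in u; objective: faster.


-- ===== PORT A =====

-- termination measure for pyZipN (cited by its decreasing_by)
theorem pvSumTailLt (ls : List (List Int)) (hne : ls ≠ []) (hall : ∀ l ∈ ls, l ≠ []) :
    ((ls.map List.tail).map List.length).sum < (ls.map List.length).sum := by
  induction ls with
  | nil => exact absurd rfl hne
  | cons x t ih =>
    have hx : x ≠ [] := hall x (by simp)
    have hxlen : x.tail.length < x.length := by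
      cases x with
      | nil => exact absurd rfl hx
      | cons a b => simp
    have ht : ((t.map List.tail).map List.length).sum ≤ (t.map List.length).sum := by
      rcases eq_or_ne t [] with rfl | htne
      · simp
      · exact le_of_lt (ih htne (fun l hl => hall l (by simp [hl])))
    simpa using Nat.add_lt_add_of_lt_of_le hxlen ht

-- zip(*lists): take one element from each list until some list is exhausted
def pyZipN (ls : List (List Int)) : List (List Int) :=
  if h : ls ≠ [] ∧ ∀ l ∈ ls, l ≠ [] then
    (ls.map (·.headI)) :: pyZipN (ls.map List.tail)
  else []
termination_by (ls.map List.length).sum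
decreasing_by
  have := pvSumTailLt ls h.1 h.2
  simpa using this

-- zip(*[s[i:] for i in range(t)])
def find_tuples (s : List Int) (t : Int) : List (List Int) :=
  pyZipN ((PySem.List.pyRange 0 t 1).map (fun i => PySem.List.slice s (some i) none))

-- c.most_common(1)[0][1]; the none branch is where Python raises IndexError
-- (empty Counter) — excluded by Pre_find_u
def mostCommon1Count (d : PySem.Dict (List Int) Int) : Int :=
  match PySem.List.pyGet? (PySem.List.sorted d.items (fun p => p.2) true) 0 with
  | some p => p.2
  | none => 0

-- the while loop of A; fuel only makes the recursion structural (unreachable at 0 under Pre_)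
def loopA (s : List Int) (threshold : Int) (u : Int) : Nat → Int
  | 0 => u
  | fuel + 1 =>
    let u' := u + 1
    let count := mostCommon1Count (PySem.Dict.counter (find_tuples s u'))
    if threshold ≤ count then loopA s threshold u' fuel else u'

def find_u (s : List Int) (threshold : Int) : Int :=
  -- initial count = threshold + 1, so the first guard test 'count >= threshold' is this:
  if threshold ≤ threshold + 1 then loopA s threshold 0 (s.length + 1) else 0

-- ===== PORT B =====

-- max_count(u): dict of window counts, then max(counts.values(), default=0)
def maxCountB (s : List Int) (u : Int) : Int :=
  let n : Int := s.length
  let counts := (PySem.List.pyRange 0 (n - u + 1) 1).foldl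
    (fun d i =>
      let t := PySem.List.slice s (some i) (some (i + u))
      d.insert t (d.getD t 0 + 1))
    PySem.Dict.empty
  PySem.List.maxD counts.values (fun x => x) 0

-- the second while loop of B (binary search)
def bsearchB (s : List Int) (threshold : Int) (lo hi : Int) : Int :=
  if h : lo < hi then
    let mid := PySem.Int.floordiv (lo + hi) 2
    if threshold ≤ maxCountB s mid then bsearchB s threshold (mid + 1) hi
    else bsearchB s threshold lo mid
  else lo
termination_by (hi - lo).toNat
decreasing_by
  · have hb := PySem.Int.floordiv_two_mid_bounds (le_of_lt h)
    omega
  · have hlt : PySem.Int.floordiv (lo + hi) 2 < hi := by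
      rw [PySem.Int.floordiv_lt_iff_lt_mul (by omega)]
      omega
    omega

-- the first while loop of B (exponential growth); fuel only makes the recursion
-- structural (unreachable at 0 under Pre_)
def growB (s : List Int) (threshold : Int) (lo hi : Int) : Nat → Int
  | 0 => lo
  | fuel + 1 =>
    if threshold ≤ maxCountB s hi then growB s threshold (hi + 1) (2 * hi) fuel
    else bsearchB s threshold lo hi

def find_u_alt (s : List Int) (threshold : Int) : Int :=
  growB s threshold 1 1 (s.length + 2)

-- ===== PRECONDITION & SPEC =====
-- Pre_ excludes exactly the inputs where A never returns: with s = [] (first Counter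
-- is empty) A raises IndexError, and with threshold ≤ 1 every count (≥ 1) satisfies
-- the guard until the Counter becomes empty, so A raises IndexError there too.
def Pre_find_u (s : List Int) (threshold : Int) : Prop := s ≠ [] ∧ 2 ≤ threshold
instance (s : List Int) (threshold : Int) : Decidable (Pre_find_u s threshold) := by
  unfold Pre_find_u; infer_instance

def pvWitness_find_u : List Int × Int := ([1, 1, 2], 2)

def Spec_find_u (s : List Int) (threshold : Int) (out : Int) : Prop := out = find_u_alt s threshold
instance (s : List Int) (threshold : Int) (out : Int) : Decidable (Spec_find_u s threshold out) := by
  unfold Spec_find_u; infer_instance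

-- ===== CLAIM (what is proved, stated in full; the proofs are below) =====
def Claim_equal_find_u : Prop := ∀ (s : List Int) (threshold : Int), Dom_find_u s threshold → Pre_find_u s threshold → Spec_find_u s threshold (find_u s threshold)

-- ===== LEMMAS AND PROOFS =====

-- the list of length-u windows of s, and the maximal window multiplicity
def win (s : List Int) (u : Nat) : List (List Int) :=
  (List.range (s.length + 1 - u)).map (fun i => (s.drop i).take u)

def Mval (s : List Int) (u : Nat) : Int :=
  (win s u).foldl (fun acc w => max acc ((win s u).count w : Int)) 0

-- what both loops compute: the least u ≥ 1 whose max multiplicity is below threshold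
def Ans (s : List Int) (threshold r : Int) : Prop :=
  1 ≤ r ∧ Mval s r.toNat < threshold ∧ ∀ j : Nat, 1 ≤ j → (j : Int) < r → threshold ≤ Mval s j

theorem ans_unique (s : List Int) (threshold r1 r2 : Int)
    (h1 : Ans s threshold r1) (h2 : Ans s threshold r2) : r1 = r2 := by
  obtain ⟨ha1, hb1, hc1⟩ := h1
  obtain ⟨ha2, hb2, hc2⟩ := h2
  by_contra hne
  rcases lt_or_gt_of_ne hne with hlt | hlt
  · have := hc2 r1.toNat (by omega) (by omega)
    have : Mval s r1.toNat < threshold := hb1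
    omega
  · have := hc1 r2.toNat (by omega) (by omega)
    have : Mval s r2.toNat < threshold := hb2
    omega

theorem foldl_max_le_int {β : Type} (l : List β) (f : β → Int) (c : Int) :
    ∀ init : Int, init ≤ c → (∀ x ∈ l, f x ≤ c) →
    l.foldl (fun acc y => max acc (f y)) init ≤ c := by
  induction l with
  | nil => intro init h0 _; simpa using h0
  | cons x t ih =>
    intro init h0 h
    simp only [List.foldl_cons]
    exact ih _ (by simp [h0, h x (by simp)]) (fun y hy => h y (by simp [hy]))

-- a value that is attained and dominates all counts IS Mval
theorem maxval_unique (s : List Int) (u : Nat) (v : Int)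
    (hmem : ∃ w ∈ win s u, ((win s u).count w : Int) = v)
    (hub : ∀ w ∈ win s u, ((win s u).count w : Int) ≤ v) : v = Mval s u := by
  obtain ⟨w, hw, hv⟩ := hmem
  have hpos : (0 : Int) ≤ v := by
    have := List.count_pos_iff.2 hw
    omega
  have h1 : Mval s u ≤ v := foldl_max_le_int _ _ _ 0 hpos hub
  have h2 : v ≤ Mval s u := by
    have := (PySem.List.le_foldl_max_int (win s u) (fun w => ((win s u).count w : Int)) 0).2 w hw
    simpa [Mval, hv] using this
  omega

theorem win_nil (s : List Int) (u : Nat) (h : s.length < u) : win s u = [] := by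
  have : s.length + 1 - u = 0 := by omega
  simp [win, this]

theorem length_win (s : List Int) (u : Nat) : (win s u).length = s.length + 1 - u := by
  simp [win]

theorem mval_le_length (s : List Int) (u : Nat) : Mval s u ≤ ((win s u).length : Int) := by
  apply foldl_max_le_int
  · simp
  · intro w _
    exact_mod_cast List.count_le_length

-- threshold ≥ 2 reachable only while the window list has ≥ 2 entries
theorem mval_ge_two (s : List Int) (u : Nat) (h : 2 ≤ Mval s u) : u + 1 ≤ s.length := by
  have := mval_le_length s u
  rw [length_win] at this
  omega

theorem heads_take (l : List Int) (u : Nat) (hu : u ≤ l.length) :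
    (List.range u).map (fun i => (l.drop i).headI) = l.take u := by
  apply List.ext_getElem
  · simp [Nat.min_eq_left hu]
  · intro i h1 h2
    simp only [List.getElem_map, List.getElem_range, List.getElem_take]
    have hi : i < l.length := by
      simp at h1
      omega
    rw [List.drop_eq_getElem_cons hi]
    rfl

theorem zipN_drops (u : Nat) (hu : 1 ≤ u) :
    ∀ s : List Int, pyZipN ((List.range u).map (fun i => s.drop i)) = win s u := by
  intro s
  induction s with
  | nil =>
    rw [pyZipN, dif_neg, win_nil _ _ (by simpa using hu)]
    intro hcond
    have := hcond.2 [] (List.mem_map.2 ⟨0, List.mem_range.2 (by omega), by simp⟩)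
    exact this rfl
  | cons a t ih =>
    rcases Nat.lt_or_ge (a :: t).length u with hgt | hle
    · rw [pyZipN, dif_neg, win_nil _ _ hgt]
      intro hcond
      refine hcond.2 ((a :: t).drop (u - 1))
        (List.mem_map.2 ⟨u - 1, List.mem_range.2 (by omega), rfl⟩) ?_
      rw [List.drop_eq_nil_iff]
      simp at hgt ⊢
      omega
    · rw [pyZipN, dif_pos]
      · have hheads : ((List.range u).map (fun i => (a :: t).drop i)).map (·.headI)
            = (a :: t).take u := by
          rw [List.map_map]
          exact heads_take (a :: t) u hle
        have htails : ((List.range u).map (fun i => (a :: t).drop i)).map List.tail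
            = (List.range u).map (fun i => t.drop i) := by
          rw [List.map_map]
          refine List.map_congr_left ?_
          intro i _
          simp only [Function.comp_apply, List.tail_drop, List.drop_succ_cons]
        rw [hheads, htails, ih]
        simp only [win, List.length_cons]
        have hlen : t.length + 1 + 1 - u = (t.length + 1 - u) + 1 := by
          simp at hle
          omega
        rw [hlen, List.range_succ_eq_map, List.map_cons, List.map_map]
        simp [Function.comp_def]
      · constructor
        · simp
          omega
        · intro l hl
          obtain ⟨i, hi, hli⟩ := List.mem_map.1 hl
          rw [List.mem_range] at hi
          rw [← hli, Ne, List.drop_eq_nil_iff]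
          omega

theorem tuples_eq (s : List Int) (t : Int) (ht : 1 ≤ t) :
    find_tuples s t = win s t.toNat := by
  unfold find_tuples
  rw [PySem.List.pyRange_one, List.map_map]
  have h1 : (List.range ((t - 0).toNat)).map
        ((fun i => PySem.List.slice s (some i) none) ∘ (fun k : Nat => (0 : Int) + (k : Int)))
      = (List.range t.toNat).map (fun i => s.drop i) := by
    have ht0 : (t - 0).toNat = t.toNat := by omega
    rw [ht0]
    refine List.map_congr_left ?_
    intro k _
    simp only [Function.comp_apply, zero_add]
    exact PySem.List.slice_from_natCast s k
  rw [h1]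
  exact zipN_drops t.toNat (by omega) s

theorem counter_win_max (s : List Int) (U : Nat) (v : Int)
    (hvmem : ∃ k ∈ PySem.Set.ofList (win s U), v = ((win s U).count k : Int))
    (hvub : ∀ y ∈ (PySem.Set.ofList (win s U)).map (fun k => ((win s U).count k : Int)), y ≤ v) :
    v = Mval s U := by
  obtain ⟨k, hk, hv⟩ := hvmem
  refine maxval_unique s U v ⟨k, (PySem.Set.mem_ofList _ _).1 hk, hv.symm⟩ ?_
  intro w hw
  exact hvub _ (List.mem_map.2 ⟨w, (PySem.Set.mem_ofList _ _).2 hw, rfl⟩)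

theorem values_counter_win (s : List Int) (U : Nat) :
    (PySem.Dict.counter (win s U)).values
      = (PySem.Set.ofList (win s U)).map (fun k => ((win s U).count k : Int)) := by
  rw [PySem.Dict.values_eq_map_keys _ (PySem.Dict.nodup_keys_counter _) 0,
    PySem.Dict.keys_counter]
  refine List.map_congr_left ?_
  intro k _
  exact PySem.Dict.getD_counter _ _

theorem maxA_eq (s : List Int) (u : Int) (hu : 1 ≤ u) :
    mostCommon1Count (PySem.Dict.counter (find_tuples s u)) = Mval s u.toNat := by
  rw [tuples_eq s u hu]
  unfold mostCommon1Count
  rw [PySem.Dict.items_counter]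
  rcases eq_or_ne (win s u.toNat) [] with hnil | hne
  · rw [hnil]
    have hofl : PySem.Set.ofList ([] : List (List Int)) = [] := rfl
    rw [hofl]
    simp only [List.map_nil]
    rw [(PySem.List.sorted_eq_nil_iff _ _ _).2 rfl]
    simp [Mval, hnil, PySem.List.pyGet?]
  · have hone : PySem.Set.ofList (win s u.toNat) ≠ [] := by
      obtain ⟨w, hw⟩ := List.exists_mem_of_ne_nil _ hne
      have hmem := (PySem.Set.mem_ofList (win s u.toNat) w).2 hw
      intro hbad
      rw [hbad] at hmem
      simp at hmem
    have hitems : ((PySem.Set.ofList (win s u.toNat)).map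
        (fun k => (k, ((win s u.toNat).count k : Int)))) ≠ [] := by
      simpa [List.map_eq_nil_iff] using hone
    cases h : PySem.List.sorted ((PySem.Set.ofList (win s u.toNat)).map
        (fun k => (k, ((win s u.toNat).count k : Int)))) (fun p => p.2) true with
    | nil =>
      rw [PySem.List.sorted_eq_nil_iff] at h
      exact absurd h hitems
    | cons m tl =>
      have h0 : (0 : Int) = ((0 : Nat) : Int) := rfl
      rw [h0, PySem.List.pyGet?_natCast]
      simp only [List.getElem?_cons_zero]
      have hmmem : m ∈ (PySem.Set.ofList (win s u.toNat)).map
          (fun k => (k, ((win s u.toNat).count k : Int))) := by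
        have : m ∈ PySem.List.sorted ((PySem.Set.ofList (win s u.toNat)).map
            (fun k => (k, ((win s u.toNat).count k : Int)))) (fun p => p.2) true := by
          rw [h]
          simp
        exact (PySem.List.mem_sorted _ _ _ _).1 this
      obtain ⟨k, hk, hmk⟩ := List.mem_map.1 hmmem
      have hub := PySem.List.key_head_sorted_rev_ge _ (fun p : List Int × Int => p.2) h
      apply counter_win_max s u.toNat
      · exact ⟨k, hk, by rw [← hmk]⟩
      · intro y hy
        obtain ⟨k', hk', hy'⟩ := List.mem_map.1 hy
        have : (k', ((win s u.toNat).count k' : Int)) ∈ (PySem.Set.ofList (win s u.toNat)).map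
            (fun k => (k, ((win s u.toNat).count k : Int))) := List.mem_map.2 ⟨k', hk', rfl⟩
        have := hub _ this
        rw [← hy']
        exact this

theorem maxB_eq (s : List Int) (u : Int) (hu : 1 ≤ u) :
    maxCountB s u = Mval s u.toNat := by
  set U := u.toNat with hU
  have hcast : u = (U : Int) := by omega
  have hwin : ∀ k : Nat,
      PySem.List.slice s (some (0 + (k : Int))) (some ((0 + (k : Int)) + u))
        = (s.drop k).take U := by
    intro k
    rw [zero_add, hcast]
    exact PySem.List.slice_natCast_add s k U
  have hfold :
      (PySem.List.pyRange 0 ((s.length : Int) - u + 1) 1).foldl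
        (fun d i =>
          let t := PySem.List.slice s (some i) (some (i + u))
          d.insert t (d.getD t 0 + 1))
        PySem.Dict.empty
      = PySem.Dict.counter (win s U) := by
    rw [PySem.List.pyRange_one, List.foldl_map]
    have h1 := PySem.List.foldl_congr_mem
      (List.range (((s.length : Int) - u + 1 - 0).toNat))
      (fun (d : PySem.Dict (List Int) Int) (k : Nat) =>
        let t := PySem.List.slice s (some (0 + (k : Int))) (some ((0 + (k : Int)) + u))
        d.insert t (d.getD t 0 + 1))
      (fun (d : PySem.Dict (List Int) Int) (k : Nat) =>
        d.insert ((s.drop k).take U) (d.getD ((s.drop k).take U) 0 + 1))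
      PySem.Dict.empty
      (by intro acc k _; simp only [hwin k])
    rw [h1]
    have hm' : (((s.length : Int) - u + 1 - 0)).toNat = s.length + 1 - U := by omega
    rw [hm']
    have h2 : (List.range (s.length + 1 - U)).foldl
        (fun (d : PySem.Dict (List Int) Int) (k : Nat) =>
          d.insert ((s.drop k).take U) (d.getD ((s.drop k).take U) 0 + 1))
        PySem.Dict.empty
      = (win s U).foldl (fun d w => d.insert w (d.getD w 0 + 1)) PySem.Dict.empty := by
      rw [win, List.foldl_map]
    rw [h2, PySem.Dict.foldl_insert_getD_add_one_eq_counter]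
  unfold maxCountB
  simp only [hfold, values_counter_win]
  rcases eq_or_ne (win s U) [] with hnil | hne
  · rw [hnil]
    simp [Mval, hnil, PySem.List.maxD_nil, PySem.Set.ofList]
  · have hSne : (PySem.Set.ofList (win s U)).map (fun k => ((win s U).count k : Int)) ≠ [] := by
      obtain ⟨w, hw⟩ := List.exists_mem_of_ne_nil _ hne
      have : w ∈ PySem.Set.ofList (win s U) := (PySem.Set.mem_ofList _ _).2 hw
      intro hbad
      rw [List.map_eq_nil_iff] at hbad
      rw [hbad] at this
      simp at this
    apply counter_win_max
    · have := PySem.List.maxD_mem _ (fun (x : Int) => x) 0 hSne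
      obtain ⟨k, hk, hkv⟩ := List.mem_map.1 this
      exact ⟨k, hk, hkv.symm⟩
    · intro y hy
      exact PySem.List.le_maxD_id _ 0 y hy

theorem mval_succ_le (s : List Int) (u : Nat) : Mval s (u + 1) ≤ Mval s u := by
  have hconv : Mval s (u + 1)
      = ((win s (u + 1)).map (fun w => ((win s (u + 1)).count w : Int))).foldl max 0 := by
    simp [Mval, List.foldl_map]
  rcases PySem.List.foldl_max_mem
      ((win s (u + 1)).map (fun w => ((win s (u + 1)).count w : Int))) 0 with h0 | hmem
  · rw [hconv, h0]
    exact (PySem.List.le_foldl_max_int (win s u) (fun w => ((win s u).count w : Int)) 0).1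
  · obtain ⟨w2, hw2, hv⟩ := List.mem_map.1 hmem
    obtain ⟨i, hi, hwi⟩ := List.mem_map.1 hw2
    rw [List.mem_range] at hi
    have hw1 : (s.drop i).take u ∈ win s u := by
      refine List.mem_map.2 ⟨i, List.mem_range.2 (by omega), rfl⟩
    have hcount : (win s (u + 1)).count w2 ≤ (win s u).count ((s.drop i).take u) := by
      have e2 : (win s (u + 1)).count w2
          = (List.range (s.length + 1 - (u + 1))).countP
              (fun j => (s.drop j).take (u + 1) == w2) := by
        simp [win, List.count, List.countP_map, Function.comp_def]
      have e1 : (win s u).count ((s.drop i).take u)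
          = (List.range (s.length + 1 - u)).countP
              (fun j => (s.drop j).take u == (s.drop i).take u) := by
        simp [win, List.count, List.countP_map, Function.comp_def]
      rw [e1, e2]
      calc (List.range (s.length + 1 - (u + 1))).countP
              (fun j => (s.drop j).take (u + 1) == w2)
          ≤ (List.range (s.length + 1 - (u + 1))).countP
              (fun j => (s.drop j).take u == (s.drop i).take u) := by
            apply List.countP_mono_left
            intro j _ hj
            have hj' : (s.drop j).take (u + 1) = w2 := by simpa using hj
            have : (s.drop j).take u = (s.drop i).take u := by
              rw [← hwi] at hj'
              have h1 : (s.drop j).take u = ((s.drop j).take (u + 1)).take u := by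
                rw [List.take_take]
                simp
              have h2 : (s.drop i).take u = ((s.drop i).take (u + 1)).take u := by
                rw [List.take_take]
                simp
              rw [h1, h2, hj']
            simpa using this
        _ ≤ (List.range (s.length + 1 - u)).countP
              (fun j => (s.drop j).take u == (s.drop i).take u) := by
            have hsub : List.Sublist (List.range (s.length + 1 - (u + 1)))
                (List.range (s.length + 1 - u)) :=
              List.range_sublist.2 (by omega)
            exact hsub.countP_le
    have hle : ((win s u).count ((s.drop i).take u) : Int) ≤ Mval s u :=
      (PySem.List.le_foldl_max_int (win s u) (fun w => ((win s u).count w : Int)) 0).2 _ hw1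
    rw [hconv, ← hv]
    exact le_trans (by exact_mod_cast hcount) hle

theorem mval_mono (s : List Int) (a b : Nat) (h : a ≤ b) : Mval s b ≤ Mval s a := by
  induction b, h using Nat.le_induction with
  | base => exact le_refl _
  | succ n hn ih => exact le_trans (mval_succ_le s n) ih

theorem loopA_spec (s : List Int) (threshold : Int) (hs : s ≠ []) (hth : 2 ≤ threshold) :
    ∀ (fuel k : Nat), s.length + 1 ≤ fuel + k →
      (∀ j : Nat, 1 ≤ j → j ≤ k → threshold ≤ Mval s j) →
      Ans s threshold (loopA s threshold (k : Int) fuel) := by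
  intro fuel
  induction fuel with
  | zero =>
    intro k hk hinv
    exfalso
    have hlen : 0 < s.length := List.length_pos_iff.2 hs
    have h1 := hinv s.length (by omega) (by omega)
    have h2 := mval_le_length s s.length
    rw [length_win] at h2
    have h3 : s.length + 1 - s.length = 1 := by omega
    rw [h3] at h2
    push_cast at h2
    omega
  | succ fuel ih =>
    intro k hk hinv
    have hcnt : mostCommon1Count (PySem.Dict.counter (find_tuples s ((k : Int) + 1)))
        = Mval s (k + 1) := by
      have h := maxA_eq s ((k : Int) + 1) (by omega)
      have ht : ((k : Int) + 1).toNat = k + 1 := by omega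
      rw [ht] at h
      exact h
    simp only [loopA, hcnt]
    split_ifs with hge
    · have hcast : ((k : Int) + 1) = ((k + 1 : Nat) : Int) := by push_cast; ring
      rw [hcast]
      refine ih (k + 1) (by omega) ?_
      intro j hj hjle
      rcases Nat.lt_or_ge j (k + 1) with hlt | hgee
      · exact hinv j hj (by omega)
      · have : j = k + 1 := by omega
        rw [this]
        exact hge
    · refine ⟨by omega, ?_, ?_⟩
      · have ht : ((k : Int) + 1).toNat = k + 1 := by omega
        rw [ht]
        omega
      · intro j hj hjlt
        exact hinv j hj (by omega)

theorem bsearchB_spec (s : List Int) (threshold : Int) :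
    ∀ (lo hi : Int), 1 ≤ lo → lo ≤ hi → Mval s hi.toNat < threshold →
      (∀ j : Nat, 1 ≤ j → (j : Int) < lo → threshold ≤ Mval s j) →
      Ans s threshold (bsearchB s threshold lo hi) := by
  intro lo hi
  induction lo, hi using bsearchB.induct s threshold with
  | case1 lo hi h mid hge ih =>
    intro h1 hlh hhi hinv
    have hb := PySem.Int.floordiv_two_mid_bounds (le_of_lt h)
    have hmidlt : PySem.Int.floordiv (lo + hi) 2 < hi := by
      rw [PySem.Int.floordiv_lt_iff_lt_mul (by omega)]
      omega
    rw [bsearchB]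
    simp only [h, dif_pos]
    rw [if_pos hge]
    refine ih (by omega) (by omega) hhi ?_
    intro j hj hjlt
    rcases lt_or_ge (j : Int) lo with hlt | hgee
    · exact hinv j hj hlt
    · have hm := maxB_eq s mid (by omega)
      rw [hm] at hge
      calc threshold ≤ Mval s mid.toNat := hge
        _ ≤ Mval s j := mval_mono s j mid.toNat (by omega)
  | case2 lo hi h mid hge ih =>
    intro h1 hlh hhi hinv
    have hb := PySem.Int.floordiv_two_mid_bounds (le_of_lt h)
    have hmidlt : PySem.Int.floordiv (lo + hi) 2 < hi := by
      rw [PySem.Int.floordiv_lt_iff_lt_mul (by omega)]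
      omega
    rw [bsearchB]
    simp only [h, dif_pos]
    rw [if_neg hge]
    have hm := maxB_eq s mid (by omega)
    rw [hm] at hge
    exact ih h1 (by omega) (by omega) hinv
  | case3 lo hi h =>
    intro h1 hlh hhi hinv
    rw [bsearchB]
    simp only [h]
    have hlo : lo = hi := by omega
    refine ⟨h1, ?_, ?_⟩
    · rw [hlo]; exact hhi
    · intro j hj hjlt
      exact hinv j hj hjlt

theorem growB_spec (s : List Int) (threshold : Int) (hth : 2 ≤ threshold) :
    ∀ (fuel : Nat) (lo hi : Int), 1 ≤ fuel → 1 ≤ lo → lo ≤ hi →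
      ((s.length : Int) + 1 ≤ (fuel : Int) + hi) →
      (∀ j : Nat, 1 ≤ j → (j : Int) < lo → threshold ≤ Mval s j) →
      Ans s threshold (growB s threshold lo hi fuel) := by
  intro fuel
  induction fuel with
  | zero => intro lo hi hf; omega
  | succ fuel ih =>
    intro lo hi _ hlo hlh hfb hinv
    have hm := maxB_eq s hi (by omega)
    simp only [growB, hm]
    split_ifs with hge
    · have h2 : 2 ≤ Mval s hi.toNat := by omega
      have hbound := mval_ge_two s hi.toNat h2
      have hhile : hi ≤ (s.length : Int) - 1 := by omega
      refine ih (hi + 1) (2 * hi) (by omega) (by omega) (by omega) (by omega) ?_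
      · intro j hj hjlt
        rcases lt_or_ge (j : Int) lo with hlt | hgee
        · exact hinv j hj hlt
        · calc threshold ≤ Mval s hi.toNat := hge
            _ ≤ Mval s j := mval_mono s j hi.toNat (by omega)
    · exact bsearchB_spec s threshold lo hi hlo hlh (by omega) hinv

-- ===== VERDICT (by name: the statement is the Claim_ definition above) =====
theorem find_u_spec : Claim_equal_find_u := by
  intro s threshold _ hpre
  obtain ⟨hs, hth⟩ := hpre
  unfold Spec_find_u
  have hA : Ans s threshold (find_u s threshold) := by
    have := loopA_spec s threshold hs hth (s.length + 1) 0 (by omega)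
      (fun j hj hj0 => by omega)
    simpa [find_u] using this
  have hB : Ans s threshold (find_u_alt s threshold) := by
    have := growB_spec s threshold hth (s.length + 2) 1 1 (by omega) (by omega) (by omega)
      (by push_cast; omega) (fun j hj hjlt => by omega)
    simpa [find_u_alt] using this
  exact ans_unique s threshold _ _ hA hB
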